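-- pv_equiv track=rewrite | github.com/reddy-nithin/Searching-Algorithms-AI- | dfs.py | dfs
-- ===== SOURCE A (Python) =====
-- def dfs(city_data, adjacency_data, start_city, end_city):
--     def depth_first_search(current_city, visited_cities, path):
--         visited_cities.add(current_city)
--         path.append(current_city)
--
--         if current_city == end_city:
--             return path
--
--         adjacent_cities = [neighbor[1] for neighbor in adjacency_data if neighbor[0] == current_city]
--         for neighbor_city in adjacent_cities:
--             if neighbor_city not in visited_cities:
--                 result = depth_first_search(neighbor_city, visited_cities, path.copy())
--                 if result:
--                     return result
--
--         return None
--
--     # Initialize the path with the starting city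
--     path = depth_first_search(start_city, set(), [])
--     return path if path else []
-- ===== SOURCE B (Python) =====
-- def dfs(city_data, adjacency_data, start_city, end_city):
--     # Build the adjacency index once, then run an iterative DFS with an explicit
--     # stack instead of re-scanning the whole edge list at every visited city.
--     adj = {}
--     for src, dst in adjacency_data:
--         adj.setdefault(src, []).append(dst)
--     visited = set()
--     stack = [(start_city, [])]
--     while stack:
--         city, path = stack.pop()
--         if city in visited:
--             continue
--         visited.add(city)
--         path = path + [city]
--         if city == end_city:
--             return path
--         for nb in reversed(adj.get(city, [])):
--             stack.append((nb, path))
--     return []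
-- ===== Notes on version B (the rewrite author's own statement) =====
-- stated objective: alternative
-- what changed: B builds an adjacency dict once and runs the DFS iteratively with an explicit stack, instead of A's recursion that re-filters the whole edge list at every visited city.
import Mathlib
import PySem

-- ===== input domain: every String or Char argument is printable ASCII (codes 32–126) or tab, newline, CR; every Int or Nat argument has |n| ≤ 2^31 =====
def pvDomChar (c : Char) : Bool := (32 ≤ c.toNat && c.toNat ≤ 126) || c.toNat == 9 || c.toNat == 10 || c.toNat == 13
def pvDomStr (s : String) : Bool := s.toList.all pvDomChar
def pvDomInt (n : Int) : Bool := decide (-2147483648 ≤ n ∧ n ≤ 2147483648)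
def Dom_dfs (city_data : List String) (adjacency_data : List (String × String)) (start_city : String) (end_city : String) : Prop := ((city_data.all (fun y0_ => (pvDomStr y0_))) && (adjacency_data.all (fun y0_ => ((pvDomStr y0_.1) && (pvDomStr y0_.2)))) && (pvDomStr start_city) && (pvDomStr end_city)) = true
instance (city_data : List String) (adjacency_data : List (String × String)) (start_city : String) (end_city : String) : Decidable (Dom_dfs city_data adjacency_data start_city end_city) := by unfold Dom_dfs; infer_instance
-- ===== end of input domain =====

-- B replaces A's per-city rescan of the whole edge list by an adjacency dict built once,
-- and runs the DFS iteratively with an explicit stack instead of recursion (objective: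
-- alternative; the dict removes the per-city edge-list scan).

-- ===== PORT A =====
-- A's inner 'for neighbor_city in adjacent_cities: …' loop with its early return; `recf` is
-- the recursive call (depth_first_search at the remaining fuel).  The mutated `visited_cities`
-- set is threaded explicitly: each call returns the updated set alongside the optional path.
def dfsAgo (recf : String → PySem.Set String → List String → PySem.Set String × Option (List String)) :
    List String → PySem.Set String → List String → PySem.Set String × Option (List String)
  | [], visited, _ => (visited, none)
  | nb :: rest, visited, path =>
    if PySem.Set.contains visited nb then dfsAgo recf rest visited path
    else
      match recf nb visited path with
      | (v', some r) => (v', some r)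
      | (v', none) => dfsAgo recf rest v' path

-- A's depth_first_search.  `fuel` only makes the recursion structural: the recursion depth is
-- bounded by the number of unvisited destination cities (each call marks a new one), so fuel
-- `adjacency_data.length + 1` is never exhausted (this is what the lemmas below establish).
def dfsArec (adjacency_data : List (String × String)) (end_city : String) :
    Nat → String → PySem.Set String → List String → PySem.Set String × Option (List String)
  | 0, _, visited, _ => (visited, none)
  | fuel + 1, current, visited, path =>
    let visited1 := PySem.Set.add visited current
    let path1 := path ++ [current]
    if current == end_city then (visited1, some path1)
    else
      dfsAgo (dfsArec adjacency_data end_city fuel)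
        ((adjacency_data.filter (fun nb => nb.1 == current)).map (fun nb => nb.2))
        visited1 path1

def dfs (city_data : List String) (adjacency_data : List (String × String)) (start_city : String) (end_city : String) : List String :=
  match dfsArec adjacency_data end_city (adjacency_data.length + 1) start_city PySem.Set.empty [] with
  | (_, some path) => if path == [] then [] else path   -- 'return path if path else []'
  | (_, none) => []

-- ===== PORT B =====
-- adj.setdefault(src, []).append(dst): value updated in place, new keys appended = Dict.modify.
def dfsBadj (adjacency_data : List (String × String)) : PySem.Dict String (List String) :=
  adjacency_data.foldl (fun d e => d.modify e.1 [] (· ++ [e.2])) PySem.Dict.empty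

-- The while-loop over the explicit stack.  The Lean list's HEAD is the Python list's END
-- (the top of the stack), so Python's 'append each of reversed(…)' then 'pop()' is the
-- foldl below.  `fuel` bounds the number of pops; sufficiency is proved in the lemmas.
def dfsBloop (adj : PySem.Dict String (List String)) (end_city : String) :
    Nat → List (String × List String) → PySem.Set String → List String
  | 0, _, _ => []
  | _ + 1, [], _ => []
  | fuel + 1, (city, path) :: stack, visited =>
    if PySem.Set.contains visited city then dfsBloop adj end_city fuel stack visited
    else
      let visited1 := PySem.Set.add visited city
      let path1 := path ++ [city]
      if city == end_city then path1
      else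
        dfsBloop adj end_city fuel
          ((adj.getD city []).reverse.foldl (fun st nb => (nb, path1) :: st) stack) visited1

-- Upper bound on the number of stack pops of a DFS started with recursion-depth budget f over
-- a graph with e edges (proved below); used as the loop fuel.
def dfsBfuel (e : Nat) : Nat → Nat
  | 0 => 0
  | f + 1 => 1 + e * (dfsBfuel e f + 1)

def dfs_alt (city_data : List String) (adjacency_data : List (String × String)) (start_city : String) (end_city : String) : List String :=
  dfsBloop (dfsBadj adjacency_data) end_city
    (dfsBfuel adjacency_data.length (adjacency_data.length + 1))
    [(start_city, [])] PySem.Set.empty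

-- ===== PRECONDITION & SPEC =====
def Spec_dfs (city_data : List String) (adjacency_data : List (String × String)) (start_city : String) (end_city : String) (out : List String) : Prop := out = dfs_alt city_data adjacency_data start_city end_city
instance (city_data : List String) (adjacency_data : List (String × String)) (start_city : String) (end_city : String) (out : List String) : Decidable (Spec_dfs city_data adjacency_data start_city end_city out) := by unfold Spec_dfs; infer_instance

-- ===== CLAIM (what is proved, stated in full; the proofs are below) =====
def Claim_equal_dfs : Prop := ∀ (city_data : List String) (adjacency_data : List (String × String)) (start_city : String) (end_city : String), Dom_dfs city_data adjacency_data start_city end_city → Spec_dfs city_data adjacency_data start_city end_city (dfs city_data adjacency_data start_city end_city)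

-- ===== LEMMAS AND PROOFS =====

-- counting helper: one witness where P fails but Q holds makes the count strictly smaller
theorem countP_lt_of_witness {α : Type} (P Q : α → Bool) :
    ∀ (l : List α) (nb : α), nb ∈ l → (∀ x, P x = true → Q x = true) →
      P nb = false → Q nb = true → l.countP P < l.countP Q := by
  intro l nb hmem hpq hP hQ
  induction l with
  | nil => simp at hmem
  | cons a l ih =>
    rw [List.countP_cons, List.countP_cons]
    rcases List.mem_cons.mp hmem with rfl | hmem'
    · rw [hP, hQ]
      have h2 := List.countP_mono_left (l := l) (p := P) (q := Q) (fun x _ => hpq x)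
      simp only [Bool.false_eq_true, if_false, if_true]
      omega
    · have := ih hmem'
      by_cases ha : P a = true
      · rw [ha, hpq a ha]; omega
      · rw [Bool.eq_false_iff.mpr ha]
        by_cases hqa : Q a = true <;> simp [hqa] <;> omega

-- number of (occurrences of) destination cities not yet visited: the termination measure
def dfsRem (adjacency_data : List (String × String)) (v : PySem.Set String) : Nat :=
  ((adjacency_data.map Prod.snd).filter (fun s => !(PySem.Set.contains v s))).length

theorem dfsRem_mono (adjacency_data : List (String × String)) (v w : PySem.Set String)
    (h : ∀ x, x ∈ v → x ∈ w) : dfsRem adjacency_data w ≤ dfsRem adjacency_data v := by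
  unfold dfsRem
  rw [← List.countP_eq_length_filter, ← List.countP_eq_length_filter]
  apply List.countP_mono_left
  intro x _ hx
  simp only [Bool.not_eq_eq_eq_not, Bool.not_true] at hx ⊢
  by_contra hc
  simp only [Bool.not_eq_false, PySem.Set.contains_iff] at hc
  rw [Bool.eq_false_iff] at hx
  exact hx ((PySem.Set.contains_iff _ _).mpr (h x hc))

theorem dfsRem_add_lt (adjacency_data : List (String × String)) (v w : PySem.Set String)
    (h : ∀ x, x ∈ v → x ∈ w) (nb : String) (hnb : nb ∉ w)
    (hmem : nb ∈ adjacency_data.map Prod.snd) :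
    dfsRem adjacency_data (PySem.Set.add w nb) < dfsRem adjacency_data v := by
  unfold dfsRem
  rw [← List.countP_eq_length_filter, ← List.countP_eq_length_filter]
  apply countP_lt_of_witness _ _ _ nb hmem
  · intro x hx
    simp only [Bool.not_eq_eq_eq_not, Bool.not_true] at hx ⊢
    by_contra hc
    rw [Bool.eq_false_iff] at hx
    simp only [Bool.not_eq_false, PySem.Set.contains_iff] at hc
    exact hx ((PySem.Set.contains_iff _ _).mpr (by rw [PySem.Set.mem_add]; exact Or.inl (h x hc)))
  · simp only [Bool.not_eq_eq_eq_not, Bool.not_false]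
    exact (PySem.Set.contains_iff _ _).mpr (by rw [PySem.Set.mem_add]; exact Or.inr rfl)
  · simp only [Bool.not_eq_eq_eq_not, Bool.not_true]
    rw [Bool.eq_false_iff]
    intro hc
    exact hnb (h nb ((PySem.Set.contains_iff _ _).mp hc))

-- the visited set only grows
theorem dfsAgo_grow (recf : String → PySem.Set String → List String → PySem.Set String × Option (List String))
    (hrec : ∀ c v p x, x ∈ v → x ∈ (recf c v p).1) :
    ∀ ns v p x, x ∈ v → x ∈ (dfsAgo recf ns v p).1 := by
  intro ns
  induction ns with
  | nil => intro v p x hx; simpa [dfsAgo] using hx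
  | cons nb rest ih =>
    intro v p x hx
    simp only [dfsAgo]
    split
    · exact ih v p x hx
    · have h1 := hrec nb v p x hx
      rcases hr : recf nb v p with ⟨v', res⟩
      rw [hr] at h1
      cases res with
      | some r => simpa using h1
      | none => simpa using ih v' p x h1

theorem dfsArec_grow (adjacency_data : List (String × String)) (end_city : String) :
    ∀ f c v p x, x ∈ v → x ∈ (dfsArec adjacency_data end_city f c v p).1 := by
  intro f
  induction f with
  | zero => intro c v p x hx; simpa [dfsArec] using hx
  | succ f ih =>
    intro c v p x hx
    have hm : x ∈ PySem.Set.add v c := by rw [PySem.Set.mem_add]; exact Or.inl hx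
    simp only [dfsArec]
    split
    · simpa using hm
    · exact dfsAgo_grow _ (fun c' v' p' y hy => ih c' v' p' y hy) _ _ _ x hm

-- Python's reversed-push onto the stack end = prepending the list, head-as-top
theorem foldl_rev_push (p : List String) :
    ∀ (l : List String) (st : List (String × List String)),
      l.reverse.foldl (fun st nb => (nb, p) :: st) st = l.map (fun nb => (nb, p)) ++ st := by
  intro l
  induction l with
  | nil => intro st; rfl
  | cons a l ih =>
    intro st
    rw [List.reverse_cons, List.foldl_append]
    simp [ih]

-- the adjacency-dict lookup is exactly A's filtered neighbour list
theorem dfsBadj_getD (adjacency_data : List (String × String)) (c : String) :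
    (dfsBadj adjacency_data).getD c [] =
      ((adjacency_data.filter (fun nb => nb.1 == c)).map (fun nb => nb.2)) := by
  unfold dfsBadj
  rw [PySem.Dict.getD_foldl_modify_append]
  simp

theorem dfsBloop_nil (adj : PySem.Dict String (List String)) (end_city : String) (f : Nat) (v : PySem.Set String) :
    dfsBloop adj end_city f [] v = [] := by
  cases f <;> rfl

-- the two simulation statements: B's loop, given `k + fb` fuel, consumes the stack entry
-- (c, p) exactly as A's recursive call does (k = the number of pops it takes), and then
-- continues on the remaining stack with A's updated visited set
def RecOK (adjacency_data : List (String × String)) (end_city : String) (f : Nat) : Prop :=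
  ∀ c v p, c ∉ v → dfsRem adjacency_data (PySem.Set.add v c) < f →
    ∃ k, k ≤ dfsBfuel adjacency_data.length f ∧ ∀ fb rest,
      dfsBloop (dfsBadj adjacency_data) end_city (k + fb) ((c, p) :: rest) v =
        match (dfsArec adjacency_data end_city f c v p).2 with
        | some r => r
        | none => dfsBloop (dfsBadj adjacency_data) end_city fb rest (dfsArec adjacency_data end_city f c v p).1

def GoOK (adjacency_data : List (String × String)) (end_city : String) (f : Nat) : Prop :=
  ∀ ns v p, (∀ x, x ∈ ns → x ∈ adjacency_data.map Prod.snd) → dfsRem adjacency_data v ≤ f →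
    ∃ k, k ≤ ns.length * (dfsBfuel adjacency_data.length f + 1) ∧ ∀ fb rest,
      dfsBloop (dfsBadj adjacency_data) end_city (k + fb) (ns.map (fun nb => (nb, p)) ++ rest) v =
        match (dfsAgo (dfsArec adjacency_data end_city f) ns v p).2 with
        | some r => r
        | none => dfsBloop (dfsBadj adjacency_data) end_city fb rest (dfsAgo (dfsArec adjacency_data end_city f) ns v p).1

theorem goOK_of_recOK (adjacency_data : List (String × String)) (end_city : String) (f : Nat)
    (h1 : RecOK adjacency_data end_city f) : GoOK adjacency_data end_city f := by
  intro ns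
  induction ns with
  | nil =>
    intro v p _ _
    exact ⟨0, by simp, fun fb rest => by simp [dfsAgo]⟩
  | cons nb tl ih =>
    intro v p hsub hrem
    by_cases hc : PySem.Set.contains v nb = true
    · obtain ⟨k, hk, hpr⟩ := ih v p (fun x hx => hsub x (List.mem_cons_of_mem _ hx)) hrem
      refine ⟨k + 1, ?_, ?_⟩
      · rw [List.length_cons, Nat.succ_mul]; omega
      · intro fb rest
        have hf : k + 1 + fb = (k + fb) + 1 := by omega
        rw [hf]
        simp only [List.map_cons, List.cons_append, dfsBloop, hc, if_true, dfsAgo]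
        exact hpr fb rest
    · have hcm : nb ∉ v := fun h => hc ((PySem.Set.contains_iff _ _).mpr h)
      have hnb_sec : nb ∈ adjacency_data.map Prod.snd := hsub nb List.mem_cons_self
      have hlt : dfsRem adjacency_data (PySem.Set.add v nb) < f :=
        Nat.lt_of_lt_of_le (dfsRem_add_lt adjacency_data v v (fun _ h => h) nb hcm hnb_sec) hrem
      obtain ⟨k1, hk1, hp1⟩ := h1 nb v p hcm hlt
      rcases hr : dfsArec adjacency_data end_city f nb v p with ⟨v1, res⟩
      cases res with
      | some r =>
        refine ⟨k1, ?_, ?_⟩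
        · calc k1 ≤ dfsBfuel adjacency_data.length f := hk1
            _ ≤ (tl.length + 1) * (dfsBfuel adjacency_data.length f + 1) := by
                rw [Nat.succ_mul]; omega
        · intro fb rest
          simp only [List.map_cons, List.cons_append]
          have := hp1 fb (tl.map (fun nb => (nb, p)) ++ rest)
          rw [hr] at this
          simp only at this
          rw [this]
          simp [dfsAgo, hcm, hr]
      | none =>
        have hgrow : ∀ x, x ∈ v → x ∈ v1 := by
          intro x hx
          have := dfsArec_grow adjacency_data end_city f nb v p x hx
          rw [hr] at this; exact this
        have hrem1 : dfsRem adjacency_data v1 ≤ f :=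
          le_trans (dfsRem_mono adjacency_data v v1 hgrow) hrem
        obtain ⟨k2, hk2, hp2⟩ := ih v1 p (fun x hx => hsub x (List.mem_cons_of_mem _ hx)) hrem1
        refine ⟨k1 + k2, ?_, ?_⟩
        · rw [List.length_cons, Nat.succ_mul]; omega
        · intro fb rest
          have hf : k1 + k2 + fb = k1 + (k2 + fb) := by omega
          rw [hf]
          simp only [List.map_cons, List.cons_append]
          have h1' := hp1 (k2 + fb) (tl.map (fun nb => (nb, p)) ++ rest)
          rw [hr] at h1'
          simp only at h1'
          rw [h1', hp2 fb rest]
          simp [dfsAgo, hcm, hr]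

theorem recOK_all (adjacency_data : List (String × String)) (end_city : String) :
    ∀ f, RecOK adjacency_data end_city f := by
  intro f
  induction f with
  | zero => intro c v p _ hlt; omega
  | succ f ih =>
    have hgo := goOK_of_recOK adjacency_data end_city f ih
    intro c v p hcv hlt
    have hcvb : PySem.Set.contains v c = false := by
      rw [Bool.eq_false_iff]
      intro h
      exact hcv ((PySem.Set.contains_iff _ _).mp h)
    by_cases hce : (c == end_city) = true
    · refine ⟨1, by simp [dfsBfuel], ?_⟩
      intro fb rest
      have hf : 1 + fb = fb + 1 := by omega
      rw [hf]
      simp only [dfsBloop, hcvb, hce, if_true, dfsArec]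
      simp
    · have hrem1 : dfsRem adjacency_data (PySem.Set.add v c) ≤ f := by omega
      obtain ⟨k2, hk2, hp2⟩ :=
        hgo ((adjacency_data.filter (fun nb => nb.1 == c)).map (fun nb => nb.2))
          (PySem.Set.add v c) (p ++ [c])
          (by
            intro x hx
            simp only [List.mem_map, List.mem_filter] at hx ⊢
            obtain ⟨e, ⟨he, _⟩, hx2⟩ := hx
            exact ⟨e, he, hx2⟩)
          hrem1
      refine ⟨k2 + 1, ?_, ?_⟩
      · have hlen : ((adjacency_data.filter (fun nb => nb.1 == c)).map (fun nb => nb.2)).length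
            ≤ adjacency_data.length := by
          rw [List.length_map]
          exact List.length_filter_le _ _
        have := Nat.mul_le_mul_right (dfsBfuel adjacency_data.length f + 1) hlen
        simp only [dfsBfuel]
        omega
      · intro fb rest
        have hf : k2 + 1 + fb = (k2 + fb) + 1 := by omega
        rw [hf]
        simp only [dfsBloop, hcvb, hce, dfsArec]
        rw [dfsBadj_getD, foldl_rev_push]
        exact hp2 fb rest

-- ===== VERDICT (by name: the statement is the Claim_ definition above) =====
theorem dfs_spec : Claim_equal_dfs := by
  intro city_data adjacency_data start_city end_city _
  unfold Spec_dfs dfs dfs_alt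
  have hrem : dfsRem adjacency_data (PySem.Set.add PySem.Set.empty start_city)
      < adjacency_data.length + 1 := by
    have h1 : dfsRem adjacency_data (PySem.Set.add PySem.Set.empty start_city)
        ≤ (adjacency_data.map Prod.snd).length := by
      unfold dfsRem
      exact List.length_filter_le _ _
    rw [List.length_map] at h1
    omega
  obtain ⟨k, hk, hp⟩ := recOK_all adjacency_data end_city (adjacency_data.length + 1)
    start_city PySem.Set.empty [] (by simp [PySem.Set.empty]) hrem
  have hfeq : k + (dfsBfuel adjacency_data.length (adjacency_data.length + 1) - k)
      = dfsBfuel adjacency_data.length (adjacency_data.length + 1) := by omega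
  have hmain := hp (dfsBfuel adjacency_data.length (adjacency_data.length + 1) - k) []
  rw [hfeq] at hmain
  rcases hA : dfsArec adjacency_data end_city (adjacency_data.length + 1)
      start_city PySem.Set.empty [] with ⟨vA, res⟩
  rw [hA] at hmain
  simp only at hmain
  cases res with
  | some pth =>
    rw [hmain]
    by_cases hp0 : pth = []
    · simp [hp0]
    · simp [hp0]
  | none =>
    rw [hmain, dfsBloop_nil]
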